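-- pv_equiv track=rewrite | github.com/ShuangYang1/HPC_Performance_Evaluation_Tools_for_life_science | CPU/modules/SingleNodeMode/cal_multitasks_scale.py | cal_multitasks_scale
-- ===== SOURCE A (Python) =====
-- def cal_multitasks_scale(cpus):
--     factors = {}
--     for t in range(1, cpus + 1):
--         if cpus % t == 0:
--             factors[t] = cpus // t
--     threads = sorted(factors.keys())[:-1]
--     parallelmode = [str(t) + "_" + str(factors[t]) for t in threads]
--     return parallelmode
-- ===== SOURCE B (Python) =====
-- def cal_multitasks_scale(cpus):
--     low = []
--     high = []
--     d = 1
--     while d * d <= cpus: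
--         if cpus % d == 0:
--             low.append(d)
--             q = cpus // d
--             if q != d:
--                 high.append(q)
--         d += 1
--     divs = low + high[::-1]
--     return [str(t) + "_" + str(cpus // t) for t in divs[:-1]]
-- ===== Notes on version B (the rewrite author's own statement) =====
-- stated objective: faster
-- what changed: Replaces the O(n) full-range scan with dict+sort+slice by paired divisor enumeration up to sqrt(n) (low/high halves, high reversed), which yields the divisors already sorted with no dict and no sort.
import Mathlib
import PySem

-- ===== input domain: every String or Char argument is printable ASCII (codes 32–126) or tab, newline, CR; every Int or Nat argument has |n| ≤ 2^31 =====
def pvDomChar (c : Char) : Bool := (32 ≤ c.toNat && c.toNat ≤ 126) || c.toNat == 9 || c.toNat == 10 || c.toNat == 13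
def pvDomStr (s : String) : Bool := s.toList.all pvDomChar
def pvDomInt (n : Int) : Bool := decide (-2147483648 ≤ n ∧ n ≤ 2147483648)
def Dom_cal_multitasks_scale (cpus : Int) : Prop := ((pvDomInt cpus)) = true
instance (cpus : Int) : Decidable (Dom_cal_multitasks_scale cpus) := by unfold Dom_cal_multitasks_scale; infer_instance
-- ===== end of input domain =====

-- B replaces A's full 1..n scan + dict + sort + slice by paired divisor enumeration up to sqrt(n) (objective: faster).

-- ===== PORT A =====
-- factors[t] in the comprehension can never miss (t is drawn from factors' keys), so getD 0 is exact here.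
def cal_multitasks_scale (cpus : Int) : List String :=
  let factors := (PySem.List.pyRange 1 (cpus + 1)).foldl
      (fun d t => if PySem.Int.mod cpus t == 0 then d.insert t (PySem.Int.floordiv cpus t) else d)
      PySem.Dict.empty
  let threads := PySem.List.slice (PySem.List.sorted (PySem.Dict.keys factors) (fun x => x)) none (some (-1))
  threads.map (fun t => PySem.Int.toStr t ++ "_" ++ PySem.Int.toStr (factors.getD t 0))

-- ===== PORT B =====
-- the while loop of Source B; termination: d*d ≤ cpus forces d ≤ cpus
def altLoop (cpus d : Int) (low high : List Int) : List Int × List Int :=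
  if h : d * d ≤ cpus then
    if PySem.Int.mod cpus d == 0 then
      let q := PySem.Int.floordiv cpus d
      if q ≠ d then altLoop cpus (d + 1) (low ++ [d]) (high ++ [q])
      else altLoop cpus (d + 1) (low ++ [d]) high
    else altLoop cpus (d + 1) low high
  else (low, high)
termination_by (cpus + 1 - d).toNat
decreasing_by
  all_goals
    (have h1 : 2 * d ≤ cpus + 1 := by nlinarith [mul_self_nonneg (d - 1)]
     have h2 : (0:Int) ≤ cpus := le_trans (mul_self_nonneg d) h
     omega)

-- high[::-1] is List.reverse (PySem.List.slice?_none_none_neg_one)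
def cal_multitasks_scale_alt (cpus : Int) : List String :=
  let r := altLoop cpus 1 [] []
  let divs := r.1 ++ r.2.reverse
  (PySem.List.slice divs none (some (-1))).map
    (fun t => PySem.Int.toStr t ++ "_" ++ PySem.Int.toStr (PySem.Int.floordiv cpus t))

-- ===== PRECONDITION & SPEC =====
def Spec_cal_multitasks_scale (cpus : Int) (out : List String) : Prop := out = cal_multitasks_scale_alt cpus
instance (cpus : Int) (out : List String) : Decidable (Spec_cal_multitasks_scale cpus out) := by unfold Spec_cal_multitasks_scale; infer_instance

-- ===== CLAIM (what is proved, stated in full; the proofs are below) =====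
def Claim_equal_cal_multitasks_scale : Prop := ∀ (cpus : Int), Dom_cal_multitasks_scale cpus → Spec_cal_multitasks_scale cpus (cal_multitasks_scale cpus)

-- ===== LEMMAS AND PROOFS =====

-- integer square root, the bound at which B's loop stops
def pvS (n : Int) : Int := ((Nat.sqrt n.toNat : Nat) : Int)

-- the ascending list of divisors of n in 1..n (A's dict keys)
def pvDivs (n : Int) : List Int := (PySem.List.pyRange 1 (n + 1)).filter (fun t => PySem.Int.mod n t == 0)

-- what B's loop accumulates: divisors up to √n, and their cofactors
def pvLow (n : Int) : List Int := (PySem.List.pyRange 1 (pvS n + 1)).filter (fun t => PySem.Int.mod n t == 0)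
def pvHigh (n : Int) : List Int :=
  ((PySem.List.pyRange 1 (pvS n + 1)).filter
      (fun t => PySem.Int.mod n t == 0 && !(PySem.Int.floordiv n t == t))).map
    (fun t => PySem.Int.floordiv n t)

lemma pvSq_le_iff (n d : Int) (hd : 1 ≤ d) : d * d ≤ n ↔ d ≤ pvS n := by
  unfold pvS
  rcases (show n ≤ 0 ∨ 0 < n by omega) with hn | hn
  · have h0 : n.toNat = 0 := by omega
    rw [h0]
    constructor
    · intro h; nlinarith
    · intro h; simp at h; omega
  · have hnn : ((n.toNat : Int)) = n := by omega
    have hdd : ((d.toNat : Int)) = d := by omega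
    rw [← hnn, ← hdd]
    rw [show ((d.toNat:Int)) * ((d.toNat:Int)) = ((d.toNat * d.toNat : Nat) : Int) by push_cast; ring]
    rw [Int.ofNat_le, Int.ofNat_le]
    exact (Nat.le_sqrt).symm

lemma pyRange_nil {a b : Int} (h : b ≤ a) : PySem.List.pyRange a b = [] := by
  apply List.eq_nil_iff_forall_not_mem.2
  intro x hx
  rw [PySem.List.mem_pyRange_one] at hx
  omega

lemma pvFloordiv_pos (n t : Int) (ht : 0 < t) : PySem.Int.floordiv n t = n / t :=
  PySem.Int.floordiv_eq_ediv_of_pos ht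

lemma pvDiv_facts (n t : Int) (hn : 0 < n) (ht : 1 ≤ t) (hd : t ∣ n) :
    1 ≤ n / t ∧ n / t ∣ n ∧ (n / t) * t = n ∧ n / (n / t) = t := by
  have htn : t ≤ n := Int.le_of_dvd hn hd
  have hmul : n / t * t = n := Int.ediv_mul_cancel hd
  have h1 : 1 ≤ n / t := by
    by_contra h
    push Not at h
    nlinarith
  refine ⟨h1, ⟨t, by linarith [hmul]⟩, hmul, ?_⟩
  have hne : n / t ≠ 0 := by omega
  calc n / (n / t) = ((n / t) * t) / (n / t) := by rw [hmul]
    _ = t := Int.mul_ediv_cancel_left t hne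

-- a divisor t ≤ √n with cofactor ≠ t has cofactor > √n
lemma pvHigh_gt (n t : Int) (hn : 0 < n) (ht : 1 ≤ t) (hts : t ≤ pvS n) (hd : t ∣ n)
    (hne : n / t ≠ t) : pvS n < n / t := by
  obtain ⟨h1, _, hmul, _⟩ := pvDiv_facts n t hn ht hd
  have hlt : t < n / t := by
    rcases lt_trichotomy t (n / t) with h | h | h
    · exact h
    · exact absurd h.symm hne
    · exfalso
      have : t * t ≤ n := (pvSq_le_iff n t ht).2 hts
      nlinarith
  have : ¬ (n / t) * (n / t) ≤ n := by nlinarith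
  rw [pvSq_le_iff n (n / t) h1] at this
  omega

-- a divisor x > √n has cofactor ≤ √n, ≠ x, and n/(n/x) = x
lemma pvLow_of_big (n x : Int) (hn : 0 < n) (hx : 1 ≤ x) (hxs : pvS n < x) (hd : x ∣ n) :
    1 ≤ n / x ∧ n / x ≤ pvS n ∧ n / x ∣ n ∧ n / (n / x) = x ∧ n / (n / x) ≠ n / x := by
  obtain ⟨h1, hdvd, hmul, hback⟩ := pvDiv_facts n x hn hx hd
  have hxx : ¬ x * x ≤ n := by
    rw [pvSq_le_iff n x hx]; omega
  have hlt : n / x < x := by nlinarith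
  have hs : n / x ≤ pvS n := by
    rw [← pvSq_le_iff n (n / x) h1]
    nlinarith
  exact ⟨h1, hs, hdvd, hback, by omega⟩

lemma mem_pvDivs {n x : Int} : x ∈ pvDivs n ↔ 1 ≤ x ∧ x ≤ n ∧ x ∣ n := by
  simp only [pvDivs, List.mem_filter, PySem.List.mem_pyRange_one, beq_iff_eq,
    PySem.Int.mod_eq_zero_iff_dvd]
  omega

lemma mem_pvLow {n x : Int} : x ∈ pvLow n ↔ 1 ≤ x ∧ x ≤ pvS n ∧ x ∣ n := by
  simp only [pvLow, List.mem_filter, PySem.List.mem_pyRange_one, beq_iff_eq,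
    PySem.Int.mod_eq_zero_iff_dvd]
  omega

lemma mem_pvHigh {n x : Int} :
    x ∈ pvHigh n ↔ ∃ t, 1 ≤ t ∧ t ≤ pvS n ∧ t ∣ n ∧ n / t ≠ t ∧ x = n / t := by
  simp only [pvHigh, List.mem_map, List.mem_filter, PySem.List.mem_pyRange_one,
    Bool.and_eq_true, beq_iff_eq, PySem.Int.mod_eq_zero_iff_dvd, Bool.not_eq_eq_eq_not,
    Bool.not_true, beq_eq_false_iff_ne]
  constructor
  · rintro ⟨t, ⟨⟨ht1, hts⟩, hd, hne⟩, rfl⟩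
    rw [pvFloordiv_pos n t (by omega)] at hne ⊢
    exact ⟨t, ht1, by omega, hd, hne, rfl⟩
  · rintro ⟨t, ht1, hts, hd, hne, rfl⟩
    refine ⟨t, ⟨⟨ht1, by omega⟩, hd, ?_⟩, ?_⟩
    · rw [pvFloordiv_pos n t (by omega)]; exact hne
    · rw [pvFloordiv_pos n t (by omega)]

lemma pvDivs_pairwise (n : Int) : (pvDivs n).Pairwise (· < ·) :=
  List.Pairwise.filter _ (PySem.List.pairwise_lt_pyRange_one 1 (n + 1))

-- the heart of the equivalence: low divisors followed by reversed cofactors ARE the sorted divisors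
lemma pvMain (n : Int) : pvLow n ++ (pvHigh n).reverse = pvDivs n := by
  rcases (show n ≤ 0 ∨ 0 < n by omega) with hn | hn
  · have hs : pvS n = 0 := by
      unfold pvS
      have : n.toNat = 0 := by omega
      simp [this]
    rw [pvDivs, pvLow, pvHigh, hs, pyRange_nil (by omega), pyRange_nil (by omega)]
    rfl
  · -- both sides are strictly increasing lists with the same members
    have hdivs_pw := pvDivs_pairwise n
    have hlow_pw : (pvLow n).Pairwise (· < ·) :=
      List.Pairwise.filter _ (PySem.List.pairwise_lt_pyRange_one 1 (pvS n + 1))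
    have hhigh_pw : (pvHigh n).Pairwise (fun a b => b < a) := by
      unfold pvHigh
      rw [List.pairwise_map]
      apply List.Pairwise.imp_of_mem ?_
        (List.Pairwise.filter _ (PySem.List.pairwise_lt_pyRange_one 1 (pvS n + 1)))
      intro a b ha hb hab
      simp only [List.mem_filter, PySem.List.mem_pyRange_one, Bool.and_eq_true, beq_iff_eq,
        PySem.Int.mod_eq_zero_iff_dvd] at ha hb
      have ha1 : (1:Int) ≤ a := ha.1.1
      have hb1 : (1:Int) ≤ b := hb.1.1
      rw [pvFloordiv_pos n a (by omega), pvFloordiv_pos n b (by omega)]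
      obtain ⟨ha1', _, hamul, _⟩ := pvDiv_facts n a hn ha1 ha.2.1
      obtain ⟨hb1', _, hbmul, _⟩ := pvDiv_facts n b hn hb1 hb.2.1
      nlinarith
    have hmemlow : ∀ x ∈ pvLow n, x ≤ pvS n := fun x hx => (mem_pvLow.1 hx).2.1
    have hmemhigh : ∀ x ∈ pvHigh n, pvS n < x := by
      intro x hx
      obtain ⟨t, ht1, hts, hd, hne, rfl⟩ := mem_pvHigh.1 hx
      exact pvHigh_gt n t hn ht1 hts hd hne
    have hlhs_pw : (pvLow n ++ (pvHigh n).reverse).Pairwise (· < ·) := by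
      rw [List.pairwise_append]
      refine ⟨hlow_pw, List.pairwise_reverse.2 hhigh_pw, ?_⟩
      intro a ha b hb
      have := hmemlow a ha
      have := hmemhigh b (List.mem_reverse.1 hb)
      omega
    -- permutation via nodup + same membership
    have hmem_iff : ∀ x, x ∈ pvLow n ++ (pvHigh n).reverse ↔ x ∈ pvDivs n := by
      intro x
      rw [List.mem_append, List.mem_reverse, mem_pvDivs, mem_pvLow, mem_pvHigh]
      constructor
      · rintro (⟨h1, hs, hd⟩ | ⟨t, ht1, hts, hd, hne, rfl⟩)
        · have hsn : pvS n ≤ n := by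
            have h := (pvSq_le_iff n (pvS n) ?_).2 le_rfl
            · nlinarith
            · rw [← pvSq_le_iff n 1 le_rfl] at *; omega
          exact ⟨h1, by omega, hd⟩
        · obtain ⟨h1, hdvd, _, _⟩ := pvDiv_facts n t hn ht1 hd
          exact ⟨h1, Int.le_of_dvd hn hdvd, hdvd⟩
      · rintro ⟨h1, hle, hd⟩
        rcases (show x ≤ pvS n ∨ pvS n < x by omega) with hsmall | hbig
        · exact Or.inl ⟨h1, hsmall, hd⟩
        · obtain ⟨hq1, hqs, hqd, hback, hneq⟩ := pvLow_of_big n x hn h1 hbig hd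
          exact Or.inr ⟨n / x, hq1, hqs, hqd, by omega, hback.symm⟩
    have hnodup_divs : (pvDivs n).Nodup := hdivs_pw.imp ne_of_lt
    have hnodup_lhs : (pvLow n ++ (pvHigh n).reverse).Nodup := hlhs_pw.imp ne_of_lt
    have hperm : (pvLow n ++ (pvHigh n).reverse).Perm (pvDivs n) :=
      (List.perm_ext_iff_of_nodup hnodup_lhs hnodup_divs).2 hmem_iff
    exact hperm.eq_of_pairwise (fun a b _ _ h1 h2 => by omega) hlhs_pw hdivs_pw

lemma altLoop_spec (n : Int) : ∀ (k : Nat) (d : Int) (low high : List Int), 1 ≤ d →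
    (pvS n + 1 - d).toNat = k →
    altLoop n d low high =
      (low ++ ((PySem.List.pyRange d (pvS n + 1)).filter (fun t => PySem.Int.mod n t == 0)),
       high ++ ((PySem.List.pyRange d (pvS n + 1)).filter
          (fun t => PySem.Int.mod n t == 0 && !(PySem.Int.floordiv n t == t))).map
          (fun t => PySem.Int.floordiv n t)) := by
  intro k
  induction k with
  | zero =>
    intro d low high hd hk
    have hgt : pvS n + 1 ≤ d := by omega
    rw [altLoop, pyRange_nil hgt]
    have : ¬ d * d ≤ n := by
      rw [pvSq_le_iff n d hd]; omega
    simp [this]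
  | succ k ih =>
    intro d low high hd hk
    have hlt : d < pvS n + 1 := by omega
    have hle : d * d ≤ n := by rw [pvSq_le_iff n d hd]; omega
    rw [altLoop, PySem.List.pyRange_one_cons hlt]
    rw [dif_pos hle]
    have hrec : (pvS n + 1 - (d + 1)).toNat = k := by omega
    by_cases hp : PySem.Int.mod n d == 0
    · rw [if_pos hp]
      by_cases hq : PySem.Int.floordiv n d ≠ d
      · rw [if_pos hq]
        rw [ih (d + 1) _ _ (by omega) hrec]
        simp [hp, hq]
      · rw [if_neg hq]
        rw [ih (d + 1) _ _ (by omega) hrec]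
        have hq' : PySem.Int.floordiv n d = d := not_not.mp hq
        simp [hp, hq']
    · rw [if_neg hp]
      rw [ih (d + 1) _ _ (by omega) hrec]
      simp [hp]

-- A's dict-building loop, with the branch folded into a filter
def pvFoldIns (n : Int) (l : List Int) (d0 : PySem.Dict Int Int) : PySem.Dict Int Int :=
  l.foldl (fun d t => if PySem.Int.mod n t == 0 then d.insert t (PySem.Int.floordiv n t) else d) d0

lemma pvFoldIns_filter (n : Int) (l : List Int) (d0 : PySem.Dict Int Int) :
    pvFoldIns n l d0 =
      (l.filter (fun t => PySem.Int.mod n t == 0)).foldl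
        (fun d t => d.insert t (PySem.Int.floordiv n t)) d0 := by
  induction l generalizing d0 with
  | nil => rfl
  | cons x xs ih =>
    rw [pvFoldIns, List.foldl_cons, List.filter_cons]
    by_cases h : PySem.Int.mod n x == 0
    · simp only [h, if_pos]
      rw [← pvFoldIns, ih, List.foldl_cons]
    · simp only [h, Bool.false_eq_true, if_false]
      rw [← pvFoldIns, ih]

lemma pvDivs_nodup (n : Int) : (pvDivs n).Nodup :=
  (pvDivs_pairwise n).imp ne_of_lt

lemma pvFactors_items (n : Int) :
    (pvFoldIns n (PySem.List.pyRange 1 (n + 1)) PySem.Dict.empty).items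
      = (pvDivs n).map (fun t => (t, PySem.Int.floordiv n t)) := by
  rw [pvFoldIns_filter]
  have h := PySem.Dict.items_foldl_insert_fresh (κ := Int) (ν := Int)
      (pvDivs n) (fun t => t) (fun t => PySem.Int.floordiv n t) PySem.Dict.empty
      (by intro a _; simp) (by simpa using pvDivs_nodup n)
  simpa [pvDivs] using h

lemma pvFactors_keys (n : Int) :
    PySem.Dict.keys (pvFoldIns n (PySem.List.pyRange 1 (n + 1)) PySem.Dict.empty) = pvDivs n := by
  simp only [PySem.Dict.keys, pvFactors_items, List.map_map]
  exact List.map_id'' (fun _ => rfl) (pvDivs n)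

lemma pvFactors_getD (n t : Int) (ht : t ∈ pvDivs n) :
    (pvFoldIns n (PySem.List.pyRange 1 (n + 1)) PySem.Dict.empty).getD t 0
      = PySem.Int.floordiv n t := by
  apply PySem.Dict.getD_of_mem_items
  · rw [pvFactors_items]
    exact List.mem_map.2 ⟨t, ht, rfl⟩
  · rw [pvFactors_keys]
    exact pvDivs_nodup n

-- ===== VERDICT (by name: the statement is the Claim_ definition above) =====
theorem cal_multitasks_scale_spec : Claim_equal_cal_multitasks_scale := by
  intro n _
  unfold Spec_cal_multitasks_scale
  show (PySem.List.slice (PySem.List.sorted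
      (PySem.Dict.keys (pvFoldIns n (PySem.List.pyRange 1 (n + 1)) PySem.Dict.empty)) (fun x => x))
      none (some (-1))).map
      (fun t => PySem.Int.toStr t ++ "_" ++ PySem.Int.toStr
        ((pvFoldIns n (PySem.List.pyRange 1 (n + 1)) PySem.Dict.empty).getD t 0)) = _
  rw [pvFactors_keys]
  rw [PySem.List.sorted_eq_self_of_pairwise _ _ ((pvDivs_pairwise n).imp le_of_lt)]
  rw [cal_multitasks_scale_alt]
  rw [altLoop_spec n _ 1 [] [] le_rfl rfl]
  simp only [List.nil_append]
  rw [show ((PySem.List.pyRange 1 (pvS n + 1)).filter (fun t => PySem.Int.mod n t == 0)) = pvLow n from rfl]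
  rw [show (((PySem.List.pyRange 1 (pvS n + 1)).filter
      (fun t => PySem.Int.mod n t == 0 && !(PySem.Int.floordiv n t == t))).map
      (fun t => PySem.Int.floordiv n t)) = pvHigh n from rfl]
  rw [pvMain]
  rw [PySem.List.slice_to_neg_one]
  apply List.map_congr_left
  intro t ht
  have htd : t ∈ pvDivs n := List.dropLast_subset _ ht
  rw [pvFactors_getD n t htd]
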